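-- pv_equiv track=rewrite | github.com/2xic-archive/VM | assembler.py | write_n_bits
-- ===== SOURCE A (Python) =====
-- def write_n_bits(output, values, current_bit_index, bits_length):
-- 	values_list = []
-- 	bits_length_list = []
-- 	if(type(values) == int and type(bits_length) == int):
-- 		values_list.append(values)
-- 		bits_length_list.append(bits_length)
-- 	elif(type(values) == list and type(bits_length) == list):
-- 		values_list = values
-- 		bits_length_list = bits_length
-- 	else:
-- 		raise Exception("Be consistent with arguments")
--
-- 	assert (len(values_list) == len(bits_length_list))
--
-- 	for index in range(len(values_list)):
-- 		current_input = values_list[index]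
-- 		for i in range(bits_length_list[index], -1, -1):
-- 			shift = current_input >> i
-- 			if(shift & 1):
-- 				output |= 1 << current_bit_index
-- 			else:
-- 				output |= 0 << current_bit_index
-- 			current_bit_index -= 1
--
-- 	if not current_bit_index == -1:
-- 		raise Exception("Need to fill buffer")
--
-- 	return output
-- ===== SOURCE B (Python) =====
-- def write_n_bits(output, values, current_bit_index, bits_length):
-- 	if type(values) == int and type(bits_length) == int:
-- 		values, bits_length = [values], [bits_length]
-- 	elif not (type(values) == list and type(bits_length) == list):
-- 		raise Exception("Be consistent with arguments")
--
-- 	assert (len(values) == len(bits_length))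
--
-- 	for value, length in zip(values, bits_length):
-- 		if length >= 0:
-- 			output |= (value % (1 << (length + 1))) << (current_bit_index - length)
-- 			current_bit_index -= length + 1
--
-- 	if not current_bit_index == -1:
-- 		raise Exception("Need to fill buffer")
--
-- 	return output
-- ===== Notes on version B (the rewrite author's own statement) =====
-- stated objective: faster
-- what changed: The per-bit inner loop (one shift/test/or per bit) is replaced by writing each value's whole bit chunk at once with one mask (value % 2^(L+1)) and one shift, iterating only over the values (zip) instead of over every bit.
import Mathlib
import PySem

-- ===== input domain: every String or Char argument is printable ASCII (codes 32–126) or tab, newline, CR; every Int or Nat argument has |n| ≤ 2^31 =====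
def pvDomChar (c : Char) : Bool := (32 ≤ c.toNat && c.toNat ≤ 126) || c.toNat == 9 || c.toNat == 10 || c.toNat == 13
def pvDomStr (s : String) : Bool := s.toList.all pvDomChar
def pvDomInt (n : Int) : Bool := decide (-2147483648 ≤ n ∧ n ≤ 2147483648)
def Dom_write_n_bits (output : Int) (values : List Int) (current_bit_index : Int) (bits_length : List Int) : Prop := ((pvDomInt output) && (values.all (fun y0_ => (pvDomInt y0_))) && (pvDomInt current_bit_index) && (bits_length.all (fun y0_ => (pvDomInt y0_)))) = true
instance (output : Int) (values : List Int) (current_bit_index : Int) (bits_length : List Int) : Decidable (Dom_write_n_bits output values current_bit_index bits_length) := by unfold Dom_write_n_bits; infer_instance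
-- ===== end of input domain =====

-- B writes each value's whole bit chunk with one mask and one shift instead of A's per-bit
-- inner loop; equivalence is proved on exactly the inputs where the Python A returns.

-- ===== PORT A =====
-- one iteration of A's inner `for i in range(bits_length_list[index], -1, -1)` loop;
-- `shift = current_input >> i` is inlined into its two uses
def pvStepA (v : Int) (t : Int × Int) (i : Int) : Int × Int :=
  if PySem.Int.band (v >>> i.toNat) 1 ≠ 0 then
    (PySem.Int.bor t.1 ((1 : Int) <<< t.2.toNat), t.2 - 1)
  else
    (PySem.Int.bor t.1 ((0 : Int) <<< t.2.toNat), t.2 - 1)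

def write_n_bits (output : Int) (values : List Int) (current_bit_index : Int) (bits_length : List Int) : Int :=
  ((PySem.List.pyRange 0 (values.length : Int) 1).foldl
    (fun t idx =>
      (PySem.List.pyRange (PySem.List.pyGetD bits_length idx 0) (-1) (-1)).foldl
        (pvStepA (PySem.List.pyGetD values idx 0)) t)
    (output, current_bit_index)).1

-- ===== PORT B =====
-- one iteration of B's `for value, length in zip(values, bits_length)` loop
def pvStepB (t : Int × Int) (p : Int × Int) : Int × Int :=
  if 0 ≤ p.2 then
    (PySem.Int.bor t.1 ((PySem.Int.mod p.1 ((1 : Int) <<< (p.2 + 1).toNat)) <<< (t.2 - p.2).toNat),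
     t.2 - (p.2 + 1))
  else t

def write_n_bits_alt (output : Int) (values : List Int) (current_bit_index : Int) (bits_length : List Int) : Int :=
  ((values.zip bits_length).foldl pvStepB (output, current_bit_index)).1

-- ===== PRECONDITION & SPEC =====
-- Pre_ is exactly where the Python A returns: equal list lengths (else AssertionError) and
-- total written bits Σ max(L+1,0) = current_bit_index + 1 (otherwise the final
-- 'Need to fill buffer' Exception, or a ValueError from a negative shift count during a write).
def Pre_write_n_bits (output : Int) (values : List Int) (current_bit_index : Int) (bits_length : List Int) : Prop :=
  values.length = bits_length.length ∧
  (bits_length.map (fun L => max (L + 1) 0)).sum = current_bit_index + 1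
instance (output : Int) (values : List Int) (current_bit_index : Int) (bits_length : List Int) : Decidable (Pre_write_n_bits output values current_bit_index bits_length) := by unfold Pre_write_n_bits; infer_instance

def pvWitness_write_n_bits : Int × List Int × Int × List Int := (0, [5, -3], 6, [2, 3])

def Spec_write_n_bits (output : Int) (values : List Int) (current_bit_index : Int) (bits_length : List Int) (out : Int) : Prop := out = write_n_bits_alt output values current_bit_index bits_length
instance (output : Int) (values : List Int) (current_bit_index : Int) (bits_length : List Int) (out : Int) : Decidable (Spec_write_n_bits output values current_bit_index bits_length out) := by unfold Spec_write_n_bits; infer_instance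

-- ===== CLAIM (what is proved, stated in full; the proofs are below) =====
def Claim_equal_write_n_bits : Prop := ∀ (output : Int) (values : List Int) (current_bit_index : Int) (bits_length : List Int), Dom_write_n_bits output values current_bit_index bits_length → Pre_write_n_bits output values current_bit_index bits_length → Spec_write_n_bits output values current_bit_index bits_length (write_n_bits output values current_bit_index bits_length)

-- ===== LEMMAS AND PROOFS =====

theorem and_add_ldiff (m X : ℕ) : (m &&& X) + m.ldiff X = m := by
  induction m using Nat.strongRecOn generalizing X with
  | _ m ih =>
    rcases Nat.eq_zero_or_pos m with h | h
    · subst h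
      have : Nat.ldiff 0 X = 0 := by
        apply Nat.eq_of_testBit_eq; intro i; simp [Nat.testBit_ldiff]
      simp [this]
    · have h2 : m / 2 < m := Nat.div_lt_self h (by norm_num)
      have ha : (m &&& X) / 2 = (m / 2) &&& (X / 2) := Nat.and_div_two
      have hl : (m.ldiff X) / 2 = (m / 2).ldiff (X / 2) := by
        apply Nat.eq_of_testBit_eq; intro i
        simp [Nat.testBit_div_two, Nat.testBit_ldiff]
      have tb : ((m &&& X).testBit 0 = (m.testBit 0 && X.testBit 0))
              ∧ ((m.ldiff X).testBit 0 = (m.testBit 0 && !X.testBit 0)) :=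
        ⟨Nat.testBit_and m X 0, Nat.testBit_ldiff m X 0⟩
      have := ih (m / 2) h2 (X / 2)
      simp only [Nat.testBit_zero] at tb
      rcases Nat.mod_two_eq_zero_or_one m with hm | hm <;>
        rcases Nat.mod_two_eq_zero_or_one X with hX | hX <;>
        rcases Nat.mod_two_eq_zero_or_one (m &&& X) with h1 | h1 <;>
        rcases Nat.mod_two_eq_zero_or_one (m.ldiff X) with h2' | h2' <;>
        simp [hm, hX, h1, h2'] at tb ⊢ <;> omega

theorem ldiff_ldiff (m X Y : ℕ) : (m.ldiff X).ldiff Y = m.ldiff (X ||| Y) := by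
  apply Nat.eq_of_testBit_eq; intro i
  simp [Nat.testBit_ldiff, Nat.testBit_or, Bool.and_assoc]

-- bor-associativity in the only shape the proof needs: the two written chunks are nonnegative
theorem borAssocNN (o : Int) (X Y : ℕ) :
    PySem.Int.bor (PySem.Int.bor o (X : Int)) (Y : Int) = PySem.Int.bor o ((X ||| Y : ℕ) : Int) := by
  by_cases ho : 0 ≤ o
  · rw [PySem.Int.bor_of_nonneg ho (by positivity), PySem.Int.bor_natCast, PySem.Int.bor_of_nonneg ho (by positivity)]
    simp [Nat.or_assoc]
  · have hX : (0:Int) ≤ (X:Int) := by positivity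
    set m : ℕ := (-o - 1).toNat with hm
    have hs1 : m - (m &&& X) = m.ldiff X := by
      have := and_add_ldiff m X; omega
    have hs2 : m.ldiff X - (m.ldiff X &&& Y) = (m.ldiff X).ldiff Y := by
      have := and_add_ldiff (m.ldiff X) Y; omega
    have hs3 : m - (m &&& (X ||| Y)) = m.ldiff (X ||| Y) := by
      have := and_add_ldiff m (X ||| Y); omega
    have e1 : PySem.Int.bor o (X : Int) = -(((m.ldiff X) : ℕ) : Int) - 1 := by
      simp only [PySem.Int.bor, if_neg ho, if_pos hX, Int.toNat_natCast, ← hm, hs1]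
    have e3 : PySem.Int.bor o ((X ||| Y : ℕ) : Int) = -((m.ldiff (X ||| Y) : ℕ) : Int) - 1 := by
      simp only [PySem.Int.bor, if_neg ho, if_pos (by positivity : (0:Int) ≤ ((X ||| Y : ℕ) : Int)),
        Int.toNat_natCast, ← hm, hs3]
    have hneg : ¬ (0 ≤ -(((m.ldiff X) : ℕ) : Int) - 1) := by
      have : (0:Int) ≤ ((m.ldiff X : ℕ) : Int) := by positivity
      omega
    have e2 : PySem.Int.bor (-(((m.ldiff X) : ℕ) : Int) - 1) (Y : Int)
        = -(((m.ldiff X).ldiff Y : ℕ) : Int) - 1 := by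
      have h5 : (-(-(((m.ldiff X) : ℕ) : Int) - 1) - 1) = ((m.ldiff X : ℕ) : Int) := by ring
      simp only [PySem.Int.bor, if_neg hneg, if_pos (by positivity : (0:Int) ≤ (Y:Int)), h5,
        Int.toNat_natCast, hs2]
    rw [e1, e2, e3, ldiff_ldiff]

theorem natMerge (b m d l : ℕ) (hb : b ≤ 1) (hm : m < 2 ^ (l + 1)) :
    (b * 2 ^ (l + 1 + d)) ||| (m * 2 ^ d) = (b * 2 ^ (l + 1) + m) * 2 ^ d := by
  have h1 : b * 2 ^ (l + 1 + d) = (b * 2 ^ (l + 1)) <<< d := by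
    rw [Nat.shiftLeft_eq]; ring
  have h2 : m * 2 ^ d = m <<< d := by rw [Nat.shiftLeft_eq]
  rw [h1, h2, ← Nat.shiftLeft_or_distrib, Nat.shiftLeft_eq]
  congr 1
  interval_cases b
  · simp
  · simpa using (Nat.two_pow_add_eq_or_of_lt hm 1).symm

theorem emod_split (v : Int) (l : ℕ) :
    v % 2 ^ (l + 2) = ((v / 2 ^ (l + 1)) % 2) * 2 ^ (l + 1) + v % 2 ^ (l + 1) := by
  have hP : (0:Int) < 2 ^ (l + 1) := by positivity
  set P : Int := 2 ^ (l + 1) with hPdef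
  have h2P : (2:Int) ^ (l + 2) = 2 * P := by rw [hPdef, pow_succ]; ring
  have hvr : P * (v / P) + v % P = v := Int.mul_ediv_add_emod v P
  have hq2 : 2 * (v / P / 2) + (v / P) % 2 = v / P := Int.mul_ediv_add_emod (v / P) 2
  have hr0 : 0 ≤ v % P := Int.emod_nonneg v (by omega)
  have hrP : v % P < P := Int.emod_lt_of_pos v hP
  have key : v = ((v / P) % 2 * P + v % P) + (2 * P) * (v / P / 2) := by
    linear_combination -hvr - P * hq2
  rw [h2P]
  calc v % (2 * P) = (((v / P) % 2 * P + v % P) + (2 * P) * (v / P / 2)) % (2 * P) := by rw [← key]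
    _ = ((v / P) % 2 * P + v % P) % (2 * P) := by rw [Int.add_mul_emod_self_left]
    _ = (v / P) % 2 * P + v % P := by
        rcases Int.emod_two_eq (v / P) with hb | hb <;> rw [hb] <;>
          apply Int.emod_eq_of_lt <;> omega

theorem pyRange_negstop (L : Int) (h : L < 0) : PySem.List.pyRange L (-1) (-1) = [] := by
  simp only [PySem.List.pyRange]
  have h1 : ¬ ((-1 : Int) = 0) := by norm_num
  have h3 : ¬ ((-1:Int) < L) := by omega
  simp [h1, h3]

theorem pyRange_desc (l : ℕ) :
    PySem.List.pyRange (l : Int) (-1) (-1) = (l : Int) :: PySem.List.pyRange ((l : Int) - 1) (-1) (-1) := by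
  cases l with
  | zero =>
    rw [pyRange_negstop (((0:ℕ):Int) - 1) (by norm_num)]
    decide
  | succ n =>
    simp only [PySem.List.pyRange]
    have h1 : ¬ ((-1 : Int) = 0) := by norm_num
    have h2 : ¬ ((0:Int) < -1) := by norm_num
    have h3 : ((-1:Int) < (n+1:ℕ)) := by push_cast; omega
    have h4 : ((-1:Int) < ((n+1:ℕ):Int) - 1) := by push_cast; omega
    simp only [h1, h2, h3, h4, if_false, if_pos]
    have c1 : ((((n+1:ℕ):Int) - -1 + - -1 - 1) / - -1).toNat = n + 2 := by push_cast; omega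
    have c2 : ((((n+1:ℕ):Int) - 1 - -1 + - -1 - 1) / - -1).toNat = n + 1 := by push_cast; omega
    rw [c1, c2, List.range_succ_eq_map, List.map_cons, List.map_map]
    push_cast
    refine ?_
    rw [List.cons.injEq]
    constructor
    · ring
    · apply List.map_congr_left
      intro k _
      simp only [Function.comp_apply]
      push_cast
      ring

-- A's inner loop over one value writes exactly the chunk (v mod 2^(l+1)) shifted up by d
theorem chunk (v : Int) (l d : ℕ) (o : Int) :
    (PySem.List.pyRange (l : Int) (-1) (-1)).foldl (pvStepA v) (o, (l : Int) + d) =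
      (PySem.Int.bor o (((v % 2 ^ (l + 1)).toNat * 2 ^ d : ℕ) : Int), (d : Int) - 1) := by
  induction l generalizing o with
  | zero =>
    rw [pyRange_desc 0, pyRange_negstop (((0:ℕ):Int) - 1) (by norm_num)]
    simp only [List.foldl_cons, List.foldl_nil]
    unfold pvStepA
    have hc : (((0:ℕ):Int) + (d:Int)).toNat = d := by omega
    have hsh : v >>> (((0:ℕ):Int)).toNat = v := by norm_num
    rw [hsh, hc, PySem.Int.band_one, PySem.Int.mod_eq_emod_of_pos (by norm_num)]
    have hp : v % 2^(0+1) = v % 2 := by norm_num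
    rw [hp]
    have h1 : ((1:Int) <<< d) = ((2^d : ℕ) : Int) := by simp [Int.shiftLeft_eq]
    rcases Int.emod_two_eq v with hb | hb <;> rw [hb] <;>
      norm_num [Int.zero_shiftLeft, h1]
  | succ n ih =>
    have hcast : ((n+1:ℕ):Int) - 1 = ((n:ℕ):Int) := by push_cast; ring
    rw [pyRange_desc (n+1), hcast, List.foldl_cons]
    have hstate : pvStepA v (o, ((n+1:ℕ):Int) + (d:Int)) ((n+1:ℕ):Int) =
        (PySem.Int.bor o (((((v / 2^(n+1)) % 2).toNat * 2^(n+1+d) : ℕ)) : Int), ((n:ℕ):Int) + (d:Int)) := by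
      unfold pvStepA
      have ht : (((n+1:ℕ):Int)).toNat = n+1 := by omega
      have hc : ((((n+1:ℕ):Int)) + (d:Int)).toNat = n+1+d := by omega
      have hsr : v >>> (n+1) = v / 2^(n+1) := by
        rw [Int.shiftRight_eq_div_pow]; norm_cast
      rw [ht, hc, hsr, PySem.Int.band_one, PySem.Int.mod_eq_emod_of_pos (by norm_num)]
      have h1 : ((1:Int) <<< (n+1+d)) = ((2^(n+1+d) : ℕ) : Int) := by simp [Int.shiftLeft_eq]
      rcases Int.emod_two_eq (v / 2^(n+1)) with hb | hb <;> rw [hb] <;>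
        norm_num [Int.zero_shiftLeft, h1] <;> ring
    rw [hstate, ih]
    have hM0 : 0 ≤ v % 2^(n+1) := Int.emod_nonneg _ (by positivity)
    have hMlt : (v % 2^(n+1)).toNat < 2^(n+1) := by
      have h := Int.emod_lt_of_pos v (b := (2:Int)^(n+1)) (by positivity)
      have hcast2 : ((2^(n+1) : ℕ) : Int) = 2^(n+1) := by push_cast; ring
      omega
    set B : ℕ := ((v / 2^(n+1)) % 2).toNat with hB
    have hBle : B ≤ 1 := by
      rcases Int.emod_two_eq (v / 2^(n+1)) with hb | hb <;> simp [hB, hb]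
    rw [borAssocNN, natMerge B _ d n hBle hMlt]
    have h0 : 0 ≤ v % 2^(n+2) := Int.emod_nonneg _ (by positivity)
    have hb2 : 0 ≤ (v / 2^(n+1)) % 2 := Int.emod_nonneg _ (by norm_num)
    have hInt : v % 2^(n+2) = ((B * 2^(n+1) + (v % 2^(n+1)).toNat : ℕ) : Int) := by
      rw [emod_split v n]
      have e1 : ((B:ℕ):Int) = (v / 2^(n+1)) % 2 := by rw [hB]; exact Int.toNat_of_nonneg hb2
      have e2 : (((v % 2^(n+1)).toNat : ℕ) : Int) = v % 2^(n+1) := Int.toNat_of_nonneg hM0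
      push_cast [e1, e2]
      ring
    have hNat : (v % 2^(n+1+1)).toNat = B * 2^(n+1) + (v % 2^(n+1)).toNat := by
      have hidx : (n+1+1) = n+2 := rfl
      rw [hidx, hInt, Int.toNat_natCast]
    rw [hNat]

-- an index-driven fold over two equal-length lists is the fold over their zip
theorem foldIdxZip (F : (Int × Int) → Int × Int → Int × Int) :
    ∀ (values bits : List Int), values.length = bits.length → ∀ s,
    (List.range values.length).foldl (fun t k => F t (values.getD k 0, bits.getD k 0)) s
      = (values.zip bits).foldl F s := by
  intro values
  induction values with
  | nil => intro bits h s; simp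
  | cons v vs ih =>
    intro bits h s
    cases bits with
    | nil => simp at h
    | cons b bs =>
      simp only [List.length_cons, List.range_succ_eq_map, List.foldl_cons, List.foldl_map,
        List.getD_cons_zero, List.getD_cons_succ, List.zip_cons_cons]
      exact ih bs (by simpa using h) _

-- A's index loop is the fold of per-value inner loops over the zipped lists
theorem outerA (values bits : List Int) (h : values.length = bits.length) (s : Int × Int) :
    (PySem.List.pyRange 0 (values.length : Int) 1).foldl
      (fun t idx =>
        (PySem.List.pyRange (PySem.List.pyGetD bits idx 0) (-1) (-1)).foldl
          (pvStepA (PySem.List.pyGetD values idx 0)) t) s =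
    (values.zip bits).foldl
      (fun t p => (PySem.List.pyRange p.2 (-1) (-1)).foldl (pvStepA p.1) t) s := by
  rw [PySem.List.pyRange_zero_natCast values.length, List.foldl_map]
  simp only [PySem.List.pyGetD_natCast]
  exact foldIdxZip (fun t p => List.foldl (pvStepA p.1) t (PySem.List.pyRange p.2 (-1) (-1))) values bits h s

-- main loop correspondence under the exact-fill invariant Σ max(L+1,0) = c + 1
theorem mainLoop (values bits : List Int) (o c : Int)
    (hsum : (bits.map (fun L => max (L + 1) 0)).sum = c + 1) :
    (values.zip bits).foldl
      (fun t p => (PySem.List.pyRange p.2 (-1) (-1)).foldl (pvStepA p.1) t) (o, c) =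
    (values.zip bits).foldl pvStepB (o, c) := by
  induction values generalizing bits o c with
  | nil => simp
  | cons v vs ih =>
    cases bits with
    | nil => simp
    | cons b bs =>
      simp only [List.map_cons, List.sum_cons] at hsum
      have hrest0 : 0 ≤ (bs.map (fun L => max (L + 1) 0)).sum :=
        List.sum_nonneg (by intro x hx; simp at hx; obtain ⟨L, _, hL⟩ := hx; omega)
      simp only [List.zip_cons_cons, List.foldl_cons]
      by_cases hbn : 0 ≤ b
      · set l : ℕ := b.toNat with hl
        have hbl : (l : Int) = b := Int.toNat_of_nonneg hbn
        have hmax : max (b + 1) 0 = b + 1 := by omega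
        set d : ℕ := (c - b).toNat with hd
        have hcd : c = (l : Int) + (d : Int) := by omega
        have hstep : (PySem.List.pyRange b (-1) (-1)).foldl (pvStepA v) (o, c) =
            (PySem.Int.bor o (((v % 2 ^ (l + 1)).toNat * 2 ^ d : ℕ) : Int), (d : Int) - 1) := by
          rw [← hbl, hcd]
          exact chunk v l d o
        have hstepB : pvStepB (o, c) (v, b) =
            (PySem.Int.bor o (((v % 2 ^ (l + 1)).toNat * 2 ^ d : ℕ) : Int), (d : Int) - 1) := by
          unfold pvStepB
          rw [if_pos (by exact hbn)]
          have h1 : (b + 1).toNat = l + 1 := by omega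
          have h2 : ((1 : Int) <<< (l + 1)) = 2 ^ (l + 1) := by
            rw [Int.shiftLeft_eq]; ring
          have h3 : (c - b).toNat = d := hd.symm
          have hM0 : 0 ≤ v % 2 ^ (l + 1) := Int.emod_nonneg _ (by positivity)
          have h4 : (v % 2 ^ (l + 1)) <<< d = (((v % 2 ^ (l + 1)).toNat * 2 ^ d : ℕ) : Int) := by
            rw [Int.shiftLeft_eq]
            push_cast [Int.toNat_of_nonneg hM0]
            ring
          rw [h1, h3, h2, PySem.Int.mod_eq_emod_of_pos (by positivity), h4]
          have hsnd : c - (b + 1) = (d : Int) - 1 := by omega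
          rw [hsnd]
        rw [hstep, hstepB]
        exact ih bs _ _ (by omega)
      · rw [pyRange_negstop b (by omega)]
        have hstepB : pvStepB (o, c) (v, b) = (o, c) := by
          unfold pvStepB; rw [if_neg (by simpa using hbn)]
        rw [hstepB]
        simp only [List.foldl_nil]
        exact ih bs _ _ (by omega)

-- ===== VERDICT (by name: the statement is the Claim_ definition above) =====
theorem write_n_bits_spec : Claim_equal_write_n_bits := by
  intro output values c bits _hdom hpre
  unfold Spec_write_n_bits write_n_bits write_n_bits_alt
  rw [outerA values bits hpre.1, mainLoop values bits output c hpre.2]
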